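-- pv_equiv track=rewrite | github.com/avichalk/csc_120 | In-Class/final practise.py | find_max_key
-- ===== SOURCE A (Python) =====
-- def find_max_key(dic):
--     maxim = 0
--     key = ''
--     for i in dic:
--         if i > maxim:
--             maxim = i
--             key = dic[i]
--     return key
-- ===== SOURCE B (Python) =====
-- def find_max_key(dic):
--     for k in sorted(dic, reverse=True):
--         if k > 0:
--             return dic[k]
--     return ''
-- ===== Notes on version B (the rewrite author's own statement) =====
-- stated objective: alternative
-- what changed: Replaces A's single-pass running-max loop with fused value capture by a sort of the keys in descending order followed by an early-exit scan for the first positive key, whose value is returned by one dict lookup.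
import Mathlib
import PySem

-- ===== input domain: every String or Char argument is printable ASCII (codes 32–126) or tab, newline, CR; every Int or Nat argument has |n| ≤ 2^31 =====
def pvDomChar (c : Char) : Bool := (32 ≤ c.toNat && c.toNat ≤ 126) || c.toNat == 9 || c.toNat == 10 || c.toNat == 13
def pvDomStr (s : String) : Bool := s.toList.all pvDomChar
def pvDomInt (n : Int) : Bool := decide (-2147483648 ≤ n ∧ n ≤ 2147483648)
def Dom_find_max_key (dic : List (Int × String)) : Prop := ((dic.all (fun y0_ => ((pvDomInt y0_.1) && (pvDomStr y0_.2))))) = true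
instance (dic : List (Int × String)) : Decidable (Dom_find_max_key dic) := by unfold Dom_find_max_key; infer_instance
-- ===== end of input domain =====

-- B replaces A's fused running-max loop by sorting the keys in descending order and scanning for the first positive key (alternative decomposition).


-- ===== PORT A =====
-- 'for i in dic' iterates the dict's keys (first occurrences, in order = dedup);
-- dic[i] is dict lookup (i is always present, so the "" default is never used).
def find_max_key (dic : List (Int × String)) : String :=
  ((PySem.List.dedup (dic.map (·.1))).foldl
    (fun (st : Int × String) i =>
      if st.1 < i then (i, (PySem.Dict.mk dic).getD i "") else st)
    (0, "")).2

-- ===== PORT B =====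
-- the 'for k in …: if k > 0: return dic[k]' early-exit scan
def fmkScan (d : PySem.Dict Int String) : List Int → String
  | [] => ""
  | k :: t => if 0 < k then d.getD k "" else fmkScan d t

def find_max_key_alt (dic : List (Int × String)) : String :=
  fmkScan (PySem.Dict.mk dic)
    (PySem.List.sorted (PySem.List.dedup (dic.map (·.1))) (fun k => k) true)

-- ===== PRECONDITION & SPEC =====
def Spec_find_max_key (dic : List (Int × String)) (out : String) : Prop := out = find_max_key_alt dic
instance (dic : List (Int × String)) (out : String) : Decidable (Spec_find_max_key dic out) := by unfold Spec_find_max_key; infer_instance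

-- ===== CLAIM =====
def Claim_equal_find_max_key : Prop := ∀ (dic : List (Int × String)), Dom_find_max_key dic → Spec_find_max_key dic (find_max_key dic)

-- ===== LEMMAS AND PROOFS =====

-- A's loop over any key list, from any state, is the running max paired with its looked-up value.
theorem pv_loop_char (d : PySem.Dict Int String) (ks : List Int) (m : Int) (s : String) :
    ks.foldl (fun (st : Int × String) i => if st.1 < i then (i, d.getD i "") else st) (m, s)
      = if ks.foldl max m = m then (m, s) else (ks.foldl max m, d.getD (ks.foldl max m) "") := by
  induction ks generalizing m s with
  | nil => simp
  | cons i t ih =>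
    simp only [List.foldl_cons]
    by_cases h : m < i
    · rw [if_pos h, ih]
      have hmax : max m i = i := max_eq_right h.le
      have hle : i ≤ t.foldl max i := (PySem.List.le_foldl_max t i).1
      rw [hmax, if_neg (by omega : ¬ t.foldl max i = m)]
      by_cases h2 : t.foldl max i = i
      · rw [if_pos h2, h2]
      · rw [if_neg h2]
    · rw [if_neg h, ih, max_eq_left (by omega)]

-- B's scan over a list of non-positive keys falls through to ''.
theorem pv_scan_nonpos (d : PySem.Dict Int String) (ks : List Int)
    (h : ∀ k ∈ ks, k ≤ 0) : fmkScan d ks = "" := by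
  induction ks with
  | nil => rfl
  | cons k t ih =>
    have hk := h k (by simp)
    simp only [fmkScan, if_neg (by omega : ¬ 0 < k)]
    exact ih (fun x hx => h x (by simp [hx]))

-- ===== VERDICT =====
theorem find_max_key_spec : Claim_equal_find_max_key := by
  intro dic _
  unfold Spec_find_max_key find_max_key find_max_key_alt
  set d := PySem.Dict.mk dic
  set l := PySem.List.dedup (dic.map (·.1)) with hl
  rw [pv_loop_char]
  set M := l.foldl max 0 with hM
  have hperm : (PySem.List.sorted l (fun k => k) true).Perm l := PySem.List.sorted_perm l _ true
  cases hs : PySem.List.sorted l (fun k => k) true with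
  | nil =>
    rw [hs] at hperm
    have hlnil : l = [] := hperm.symm.eq_nil
    rw [hM, hlnil]
    simp [fmkScan]
  | cons h0 t =>
    have hhead : ∀ y ∈ l, y ≤ h0 := by
      intro y hy
      exact PySem.List.key_head_sorted_rev_ge l (fun k => k) hs y hy
    have hh0mem : h0 ∈ l :=
      (PySem.List.mem_sorted l (fun k => k) true h0).mp (by rw [hs]; simp)
    by_cases hpos : 0 < h0
    · -- the head is the positive max: M = h0
      have hMge : h0 ≤ M := (PySem.List.le_foldl_max l 0).2 h0 hh0mem
      have hMle : M ≤ h0 := by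
        rcases PySem.List.foldl_max_mem l 0 with h1 | h1
        · omega
        · exact hhead M h1
      have hMh : M = h0 := le_antisymm hMle hMge
      rw [if_neg (by omega : ¬ M = 0)]
      simp [fmkScan, if_pos hpos, hMh]
    · -- all keys ≤ h0 ≤ 0: A keeps (0,''), B falls through
      have hall : ∀ k ∈ h0 :: t, k ≤ 0 := by
        intro k hk
        have : k ∈ l := by
          have : k ∈ PySem.List.sorted l (fun k => k) true := by rw [hs]; exact hk
          exact (PySem.List.mem_sorted l (fun k => k) true k).mp this
        have := hhead k this; omega
      have hM0 : M = 0 := by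
        rcases PySem.List.foldl_max_mem l 0 with h1 | h1
        · exact h1
        · have h2 := (PySem.List.le_foldl_max l 0).1
          have h3 := hhead M h1
          omega
      rw [if_pos hM0, pv_scan_nonpos d _ hall]
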